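-- pv_equiv track=rewrite | github.com/miliar/Code_Jam_Webscraper | solutions_python/Problem_1/331.py | google
-- ===== SOURCE A (Python) =====
-- def google (engines, queries):
--     switch = 0
--     while 1:
--         max = 0
--         for item in engines:
--             try:
--                 indi = queries.index(item)
--             except ValueError:
--                 return switch
--             if indi > max:
--                 max = indi
--         switch = switch + 1
--         del queries[0: max]
-- ===== SOURCE B (Python) =====
-- def google(engines, queries):
--     # Alternative single-pass algorithm: count how many times the window of queries covers all
--     # distinct engines; each completion is one forced switch.
--     # (A mutates `queries` in place; B does not — equivalence is about the return value.)
--     eng = set(engines)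
--     need = len(eng)
--     switches = 0
--     seen = set()
--     for q in queries:
--         if q in eng:
--             seen.add(q)
--             if len(seen) == need:
--                 switches += 1
--                 seen = {q}
--     return switches
-- ===== Notes on version B (the rewrite author's own statement) =====
-- stated objective: alternative
-- what changed: Replaces the repeated per-round scans (for each engine a queries.index over the whole remaining list, then a prefix deletion, round after round) by one left-to-right pass over queries maintaining the set of distinct engines seen since the last switch, incrementing the switch count and resetting the set whenever it becomes complete.
import Mathlib
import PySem

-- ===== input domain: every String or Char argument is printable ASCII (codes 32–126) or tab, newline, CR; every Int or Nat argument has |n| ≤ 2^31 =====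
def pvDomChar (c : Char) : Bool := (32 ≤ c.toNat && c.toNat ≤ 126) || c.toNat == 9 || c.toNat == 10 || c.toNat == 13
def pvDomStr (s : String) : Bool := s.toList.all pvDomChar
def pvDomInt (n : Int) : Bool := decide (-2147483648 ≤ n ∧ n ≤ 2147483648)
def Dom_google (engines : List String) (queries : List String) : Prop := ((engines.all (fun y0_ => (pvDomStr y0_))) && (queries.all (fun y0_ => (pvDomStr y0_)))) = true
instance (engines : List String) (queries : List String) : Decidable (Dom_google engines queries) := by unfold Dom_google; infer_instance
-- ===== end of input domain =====

-- B replaces A's round-by-round rescans (queries.index per engine, then prefix deletion)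
-- by one left-to-right pass over queries maintaining the set of distinct engines seen
-- since the last switch (objective: alternative single-pass algorithm).
-- A mutates `queries` in place (del queries[0:max]); B does not — the equivalence proved
-- here is about the return value only.

-- ===== PORT A =====
-- the 'for item in engines' body: none = some queries.index(item) raised ValueError → A returns
def googleMax (qs : List String) (mx : Nat) : List String → Option Nat
  | [] => some mx
  | item :: rest =>
    match PySem.List.index? qs item with
    | none => none
    | some indi => googleMax qs (if indi > mx then indi else mx) rest

-- the 'while 1' loop; fuel only makes the recursion total: wherever Python A returns
-- (= Pre_google), queries shrinks every round, so fuel = queries.length + 1 is never exhausted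
def googleLoop (engines : List String) : Nat → List String → Int → Int
  | 0, _, switch => switch
  | fuel + 1, queries, switch =>
    match googleMax queries 0 engines with
    | none => switch
    | some mx => googleLoop engines fuel (queries.drop mx) (switch + 1)  -- del queries[0:max]

def google (engines : List String) (queries : List String) : Int :=
  googleLoop engines (queries.length + 1) queries 0

-- ===== PORT B =====
-- the body of B's single 'for q in queries' loop; state = (switches, seen)
def googleStep (eng : PySem.Set String) (need : Int) (st : Int × PySem.Set String) (q : String) : Int × PySem.Set String :=
  if eng.contains q then
    let seen := st.2.add q
    if PySem.Set.len seen = need then (st.1 + 1, PySem.Set.ofList [q]) else (st.1, seen)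
  else st

def google_alt (engines : List String) (queries : List String) : Int :=
  let eng : PySem.Set String := PySem.Set.ofList engines
  let need : Int := PySem.Set.len eng
  (queries.foldl (googleStep eng need) (0, PySem.Set.empty)).1

-- ===== PRECONDITION & SPEC =====
-- Pre_google is exactly where Python A terminates: A diverges (the while-loop never
-- returns) when engines is empty or all engines are one repeated value occurring in
-- queries; it excludes no input on which A returns.
def Pre_google (engines : List String) (queries : List String) : Prop :=
  (∃ e1 ∈ engines, ∃ e2 ∈ engines, e1 ≠ e2) ∨ (∃ e ∈ engines, e ∉ queries)
instance (engines : List String) (queries : List String) : Decidable (Pre_google engines queries) := by unfold Pre_google; infer_instance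

def pvWitness_google : List String × List String := (["a", "b"], ["a", "b", "a"])

def Spec_google (engines : List String) (queries : List String) (out : Int) : Prop := out = google_alt engines queries
instance (engines : List String) (queries : List String) (out : Int) : Decidable (Spec_google engines queries out) := by unfold Spec_google; infer_instance

-- ===== CLAIM (what is proved, stated in full; the proofs are below) =====
def Claim_equal_google : Prop := ∀ (engines : List String) (queries : List String), Dom_google engines queries → Pre_google engines queries → Spec_google engines queries (google engines queries)

-- ===== LEMMAS AND PROOFS =====

-- the seen-set accumulated by B's loop while no completion fires
def addSeen (eng : PySem.Set String) (s : PySem.Set String) (l : List String) : PySem.Set String :=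
  l.foldl (fun s q => if eng.contains q then s.add q else s) s

theorem mem_addSeen (eng : PySem.Set String) (l : List String) (s : PySem.Set String) (x : String) :
    x ∈ addSeen eng s l ↔ x ∈ s ∨ (x ∈ l ∧ x ∈ eng) := by
  induction l generalizing s with
  | nil => simp [addSeen]
  | cons q l ih =>
    simp only [addSeen, List.foldl_cons] at *
    by_cases hq : eng.contains q = true
    · rw [if_pos hq, ih]
      have hqe : q ∈ eng := (PySem.Set.contains_iff eng q).mp hq
      simp only [PySem.Set.mem_add, List.mem_cons]
      constructor
      · rintro ((h | rfl) | ⟨h1, h2⟩)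
        · exact Or.inl h
        · exact Or.inr ⟨Or.inl rfl, hqe⟩
        · exact Or.inr ⟨Or.inr h1, h2⟩
      · rintro (h | ⟨(rfl | h1), h2⟩)
        · exact Or.inl (Or.inl h)
        · exact Or.inl (Or.inr rfl)
        · exact Or.inr ⟨h1, h2⟩
    · rw [if_neg hq, ih]
      have hqe : q ∉ eng := fun h => hq ((PySem.Set.contains_iff eng q).mpr h)
      simp only [List.mem_cons]
      constructor
      · rintro (h | ⟨h1, h2⟩)
        · exact Or.inl h
        · exact Or.inr ⟨Or.inr h1, h2⟩
      · rintro (h | ⟨(rfl | h1), h2⟩)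
        · exact Or.inl h
        · exact absurd h2 hqe
        · exact Or.inr ⟨h1, h2⟩

theorem nodup_addSeen (eng : PySem.Set String) (l : List String) (s : PySem.Set String)
    (hs : s.Nodup) : (addSeen eng s l).Nodup := by
  induction l generalizing s with
  | nil => exact hs
  | cons q l ih =>
    simp only [addSeen, List.foldl_cons]
    split
    · exact ih _ (PySem.Set.nodup_add s q hs)
    · exact ih _ hs

-- a nodup proper subset of a nodup list is strictly shorter
theorem length_lt_of_nodup_ssub {l t : List String} (hl : l.Nodup) (ht : t.Nodup)
    (hsub : ∀ x ∈ l, x ∈ t) (e : String) (het : e ∈ t) (hel : e ∉ l) :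
    l.length < t.length := by
  have h1 : l ⊆ t.erase e := by
    intro x hx
    exact (List.Nodup.mem_erase_iff ht).mpr ⟨fun hxe => hel (hxe ▸ hx), hsub x hx⟩
  have h2 := (hl.subperm h1).length_le
  have h3 : (t.erase e).length = t.length - 1 := List.length_erase_of_mem het
  have h4 : 1 ≤ t.length := List.length_pos_of_mem het
  omega

-- nodup lists with the same membership have the same length
theorem length_eq_of_nodup_mem_iff {l t : List String} (hl : l.Nodup) (ht : t.Nodup)
    (h : ∀ x, x ∈ l ↔ x ∈ t) : l.length = t.length :=
  le_antisymm (hl.subperm (fun _ hx => (h _).mp hx)).length_le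
    (ht.subperm (fun _ hx => (h _).mpr hx)).length_le

-- B's loop leaves the switch count alone while some engine is still missing
theorem foldl_no_complete (eng : PySem.Set String) (heng : eng.Nodup) (l : List String) :
    ∀ (s : PySem.Set String) (sw : Int), s.Nodup → (∀ x ∈ s, x ∈ eng) →
    (∃ e ∈ eng, e ∉ s ∧ e ∉ l) →
    l.foldl (googleStep eng (PySem.Set.len eng)) (sw, s) = (sw, addSeen eng s l) := by
  induction l with
  | nil => intro s sw _ _ _; rfl
  | cons q l ih =>
    intro s sw hsnd hsse ⟨e, he, hes, hel⟩
    simp only [List.foldl_cons, addSeen]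
    by_cases hq : eng.contains q = true
    · have hqe : q ∈ eng := (PySem.Set.contains_iff eng q).mp hq
      have hnd' : (s.add q).Nodup := PySem.Set.nodup_add s q hsnd
      have hsub' : ∀ x ∈ s.add q, x ∈ eng := by
        intro x hx
        rcases (PySem.Set.mem_add s q x).mp hx with h | rfl
        · exact hsse x h
        · exact hqe
      have hlt : (s.add q).length < eng.length := by
        refine length_lt_of_nodup_ssub hnd' heng hsub' e he ?_
        intro hx
        rcases (PySem.Set.mem_add s q e).mp hx with h | rfl
        · exact hes h
        · exact hel (List.mem_cons_self)
      have hne : PySem.Set.len (s.add q) ≠ PySem.Set.len eng := by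
        simp only [PySem.Set.len]
        omega
      simp only [googleStep, hq, if_true, if_neg hne]
      exact ih (s.add q) sw hnd' hsub'
        ⟨e, he, fun hx => (by
          rcases (PySem.Set.mem_add s q e).mp hx with h | rfl
          · exact hes h
          · exact hel List.mem_cons_self), fun hx => hel (List.mem_cons_of_mem _ hx)⟩
    · simp only [googleStep, hq, Bool.false_eq_true, if_false]
      exact ih s sw hsnd hsse ⟨e, he, hes, fun hx => hel (List.mem_cons_of_mem _ hx)⟩

-- googleMax returns none iff some engine is absent from the window
theorem googleMax_eq_none_iff (qs : List String) (E : List String) (mx : Nat) :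
    googleMax qs mx E = none ↔ ∃ e ∈ E, e ∉ qs := by
  induction E generalizing mx with
  | nil => simp [googleMax]
  | cons item rest ih =>
    simp only [googleMax]
    cases hidx : PySem.List.index? qs item with
    | none =>
      simp only [true_iff]
      exact ⟨item, List.mem_cons_self, (PySem.List.index?_eq_none_iff qs item).mp hidx⟩
    | some i =>
      rw [ih]
      constructor
      · rintro ⟨e, he, hnq⟩; exact ⟨e, List.mem_cons_of_mem _ he, hnq⟩
      · rintro ⟨e, he, hnq⟩
        rcases List.mem_cons.mp he with rfl | he'
        · have hc := (PySem.List.index?_eq_none_iff qs e).mpr hnq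
          rw [hidx] at hc
          simp at hc
        · exact ⟨e, he', hnq⟩

-- googleMax's some case: bounds and attainment
theorem googleMax_eq_some (qs : List String) (E : List String) (mx m : Nat)
    (h : googleMax qs mx E = some m) :
    mx ≤ m ∧ (∀ e ∈ E, ∃ i, PySem.List.index? qs e = some i ∧ i ≤ m) ∧
      (m = mx ∨ ∃ e ∈ E, PySem.List.index? qs e = some m) := by
  induction E generalizing mx with
  | nil =>
    simp only [googleMax, Option.some_inj] at h
    subst h
    exact ⟨le_refl _, by simp, Or.inl rfl⟩
  | cons item rest ih =>
    cases hidx : PySem.List.index? qs item with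
    | none =>
      simp only [googleMax, hidx] at h
      simp at h
    | some i =>
      simp only [googleMax, hidx] at h
      obtain ⟨h1, h2, h3⟩ := ih _ h
      have hbnd : mx ≤ (if i > mx then i else mx) ∧ i ≤ (if i > mx then i else mx) := by
        split <;> omega
      have hmx : mx ≤ m := le_trans hbnd.1 h1
      refine ⟨hmx, ?_, ?_⟩
      · intro e he
        rcases List.mem_cons.mp he with rfl | he'
        · exact ⟨i, hidx, le_trans hbnd.2 h1⟩
        · exact h2 e he'
      · rcases h3 with heq | ⟨e, he, hi⟩
        · by_cases hgt : i > mx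
          · simp only [if_pos hgt] at heq
            exact Or.inr ⟨item, List.mem_cons_self, heq ▸ hidx⟩
          · simp only [if_neg hgt] at heq
            exact Or.inl heq
        · exact Or.inr ⟨e, List.mem_cons_of_mem _ he, hi⟩

-- main invariant: one round of A = the scan of B up to (and including) the completion point
theorem googleLoop_eq_foldl (engines : List String)
    (htwo : ∃ e1 ∈ engines, ∃ e2 ∈ engines, e1 ≠ e2) :
    ∀ (fuel : Nat) (qs : List String) (sw : Int), qs.length < fuel →
      googleLoop engines fuel qs sw =
        (qs.foldl (googleStep (PySem.Set.ofList engines) (PySem.Set.len (PySem.Set.ofList engines))) (sw, PySem.Set.empty)).1 := by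
  intro fuel
  induction fuel with
  | zero => intro qs sw h; omega
  | succ fuel ih =>
    intro qs sw hlen
    set eng : PySem.Set String := PySem.Set.ofList engines with heng
    have heng_nd : eng.Nodup := PySem.Set.nodup_ofList engines
    cases hgm : googleMax qs 0 engines with
    | none =>
      simp only [googleLoop, hgm]
      obtain ⟨e, he, henq⟩ := (googleMax_eq_none_iff qs engines 0).mp hgm
      rw [foldl_no_complete eng heng_nd qs PySem.Set.empty sw List.nodup_nil (by simp [PySem.Set.empty])
        ⟨e, (PySem.Set.mem_ofList engines e).mpr he, by simp [PySem.Set.empty], henq⟩]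
    | some m =>
      simp only [googleLoop, hgm]
      obtain ⟨-, hall, hatt⟩ := googleMax_eq_some qs engines 0 m hgm
      -- m ≥ 1 and m is the first index of some engine e0
      obtain ⟨e1, he1, e2, he2, hne⟩ := htwo
      obtain ⟨i1, hi1, hi1m⟩ := hall e1 he1
      obtain ⟨i2, hi2, hi2m⟩ := hall e2 he2
      obtain ⟨hk1, hq1, -⟩ := PySem.List.getElem_of_index?_eq_some hi1
      obtain ⟨hk2, hq2, -⟩ := PySem.List.getElem_of_index?_eq_some hi2
      have hi12 : i1 ≠ i2 := by
        intro h; subst h; exact hne (hq1 ▸ hq2 ▸ rfl)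
      have hm1 : 1 ≤ m := by omega
      obtain ⟨e0, he0, hie0⟩ : ∃ e ∈ engines, PySem.List.index? qs e = some m := by
        rcases hatt with h | h
        · omega
        · exact h
      obtain ⟨hmlen, hqm, hfirst⟩ := PySem.List.getElem_of_index?_eq_some hie0
      have hneed2 : 2 ≤ eng.length := by
        have h1 : e1 ∈ eng := (PySem.Set.mem_ofList engines e1).mpr he1
        have h2 : e2 ∈ eng := (PySem.Set.mem_ofList engines e2).mpr he2
        rcases heq : eng with _ | ⟨a, _ | ⟨b, t⟩⟩
        · rw [heq] at h1; cases h1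
        · rw [heq] at h1 h2
          simp only [List.mem_singleton] at h1 h2
          exact absurd (h1.trans h2.symm) hne
        · simp only [List.length_cons]; omega
      have he0nt : e0 ∉ qs.take m := by
        intro hx
        obtain ⟨j, hj, hjx⟩ := List.mem_take_iff_getElem.mp hx
        exact hfirst j (by omega) hjx
      -- decompose qs around index m
      have hqs : qs = qs.take m ++ qs[m] :: qs.drop (m + 1) := by
        conv_lhs => rw [← List.take_append_drop m qs]
        rw [List.drop_eq_getElem_cons hmlen]
      have hdrop : qs.drop m = qs[m] :: qs.drop (m + 1) := List.drop_eq_getElem_cons hmlen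
      -- fold over the prefix from ∅ collects exactly eng \ {e0}
      have he0eng : e0 ∈ eng := (PySem.Set.mem_ofList engines e0).mpr he0
      have hpre := foldl_no_complete eng heng_nd (qs.take m) PySem.Set.empty sw
        List.nodup_nil (by simp [PySem.Set.empty])
        ⟨e0, he0eng, by simp [PySem.Set.empty], he0nt⟩
      set S := addSeen eng PySem.Set.empty (qs.take m) with hS
      have hSnd : S.Nodup := nodup_addSeen eng _ _ List.nodup_nil
      have hSmem : ∀ x, x ∈ S ↔ x ∈ qs.take m ∧ x ∈ eng := by
        intro x
        rw [hS, mem_addSeen]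
        simp [PySem.Set.empty]
      have he0S : e0 ∉ S := fun h => he0nt ((hSmem e0).mp h).1
      -- the step at qs[m] completes the set
      have hcomplete : ∀ x, x ∈ S.add e0 ↔ x ∈ eng := by
        intro x
        rw [PySem.Set.mem_add, hSmem]
        constructor
        · rintro (⟨-, h⟩ | rfl)
          · exact h
          · exact he0eng
        · intro hx
          by_cases hxe0 : x = e0
          · exact Or.inr hxe0
          · left
            refine ⟨?_, hx⟩
            have hxeng : x ∈ engines := (PySem.Set.mem_ofList engines x).mp hx
            obtain ⟨i, hi, him⟩ := hall x hxeng
            obtain ⟨hilen, hqi, -⟩ := PySem.List.getElem_of_index?_eq_some hi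
            have him' : i < m := by
              rcases lt_or_eq_of_le him with h | rfl
              · exact h
              · exact absurd (hqi ▸ hqm ▸ rfl) hxe0
            exact List.mem_take_iff_getElem.mpr ⟨i, by omega, hqi⟩
      have hlencomp : PySem.Set.len (S.add e0) = PySem.Set.len eng := by
        simp only [PySem.Set.len, Int.natCast_inj]
        refine length_eq_of_nodup_mem_iff (PySem.Set.nodup_add S e0 hSnd) heng_nd hcomplete
      have hScontains : eng.contains e0 = true := (PySem.Set.contains_iff eng e0).mpr he0eng
      have hof : PySem.Set.empty.add e0 = PySem.Set.ofList [e0] := rfl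
      -- single-step facts
      have hstepA : googleStep eng (PySem.Set.len eng) (sw, S) qs[m] = (sw + 1, PySem.Set.ofList [e0]) := by
        simp only [googleStep, hqm, hScontains, if_true]
        rw [if_pos hlencomp]
      have hstepB : googleStep eng (PySem.Set.len eng) (sw + 1, PySem.Set.empty) qs[m] = (sw + 1, PySem.Set.ofList [e0]) := by
        have hlen1 : PySem.Set.len (PySem.Set.empty.add e0) ≠ PySem.Set.len eng := by
          have h1 : PySem.Set.empty.add e0 = [e0] := rfl
          rw [h1]
          simp only [PySem.Set.len, List.length_cons, List.length_nil]
          intro hc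
          omega
        simp only [googleStep, hqm, hScontains, if_true]
        rw [if_neg hlen1, hof]
      -- rewrite both sides
      conv_rhs => rw [hqs]
      rw [List.foldl_append, hpre, List.foldl_cons, hstepA]
      have hdlen : (qs.drop m).length < fuel := by
        simp only [List.length_drop]; omega
      rw [ih (qs.drop m) (sw + 1) hdlen, hdrop, List.foldl_cons, hstepB]

-- ===== VERDICT (by name: the statement is the Claim_ definition above) =====
theorem google_spec : Claim_equal_google := by
  intro engines queries _hdom hpre
  unfold Spec_google google google_alt
  rcases hpre with htwo | ⟨e, he, henq⟩
  · exact googleLoop_eq_foldl engines htwo (queries.length + 1) queries 0 (by omega)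
  · simp only [googleLoop, (googleMax_eq_none_iff queries engines 0).mpr ⟨e, he, henq⟩]
    rw [foldl_no_complete (PySem.Set.ofList engines) (PySem.Set.nodup_ofList engines) queries
      PySem.Set.empty 0 List.nodup_nil (by simp [PySem.Set.empty])
      ⟨e, (PySem.Set.mem_ofList engines e).mpr he, by simp [PySem.Set.empty], henq⟩]
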